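-- pv_equiv track=rewrite | github.com/SevenThRe/docapi-tools | scripts/extract_api_inventory.py | collect_annotation_block
-- ===== SOURCE A (Python) =====
-- from typing import Any, Dict, List, Optional, Sequence, Tuple
--
-- def collect_annotation_block(lines: Sequence[str], start_index: int) -> Tuple[List[str], int]:
--     annotations: List[str] = []
--     i = start_index
--     while i < len(lines):
--         if not lines[i].lstrip().startswith("@"):
--             break
--         current = [lines[i].rstrip("\n")]
--         paren_depth = lines[i].count("(") - lines[i].count(")")
--         i += 1
--         while i < len(lines) and paren_depth > 0:
--             current.append(lines[i].rstrip("\n"))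
--             paren_depth += lines[i].count("(") - lines[i].count(")")
--             i += 1
--         annotations.append(" ".join(part.strip() for part in current))
--     return annotations, i
-- ===== SOURCE B (Python) =====
-- def collect_annotation_block(lines, start_index):
--     n = len(lines)
--
--     def net(k):
--         return lines[k].count("(") - lines[k].count(")")
--
--     def block_end(s):
--         # smallest e in (s, n] where the running paren balance of lines s..e-1 drops to <= 0, else n
--         total = 0
--         for e in range(s, n):
--             total += net(e)
--             if total <= 0:
--                 return e + 1
--         return n
--
--     def render(s, e):
--         return " ".join(lines[k].strip() for k in range(s, e))
--
--     def go(i):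
--         if i < n and lines[i].lstrip().startswith("@"):
--             e = block_end(i)
--             rest, stop = go(e)
--             return [render(i, e)] + rest, stop
--         return [], i
--
--     return go(start_index)
-- ===== Notes on version B (the rewrite author's own statement) =====
-- stated objective: alternative
-- what changed: Replaces A's buffer-accumulating nested while loops with a recursion on block structure: a separate boundary search (block_end, the first index where the running paren balance drops to <= 0) and a renderer that rebuilds each annotation from the index range, so no line buffer or mutable result list is kept.
import Mathlib
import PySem

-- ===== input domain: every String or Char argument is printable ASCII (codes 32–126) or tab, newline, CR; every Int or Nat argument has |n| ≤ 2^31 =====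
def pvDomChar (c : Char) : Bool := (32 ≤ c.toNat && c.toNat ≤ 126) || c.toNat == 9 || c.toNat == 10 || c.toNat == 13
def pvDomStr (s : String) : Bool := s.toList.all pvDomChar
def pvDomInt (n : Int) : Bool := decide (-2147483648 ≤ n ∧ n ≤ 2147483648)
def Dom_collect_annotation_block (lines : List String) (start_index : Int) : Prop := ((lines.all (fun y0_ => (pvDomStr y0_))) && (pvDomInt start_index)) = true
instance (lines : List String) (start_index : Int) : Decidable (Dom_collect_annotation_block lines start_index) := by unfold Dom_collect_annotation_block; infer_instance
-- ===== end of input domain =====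

-- B replaces A's buffer-accumulating nested while loops by a recursion on block structure:
-- a boundary search (block_end, a prefix-sum crossing scan) separated from rendering, which
-- rebuilds each annotation from an index range instead of an accumulated buffer (objective: alternative).

-- shared primitives (the Python builtins both programs call);
-- the while loops / for-range loops are ported as structural recursion on a fuel that
-- over-approximates the number of remaining iterations (exhaustion never fires, proved below)
-- s.rstrip("\n"): hand port (PySem has no one-sided strip with a chars argument);
-- exact: drops exactly the trailing '\n' characters.
def pvRstripNL (s : String) : String := String.ofList ((s.toList.reverse.dropWhile (· == '\n')).reverse)
-- line.count("(") - line.count(")")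
def pvNet (s : String) : Int := (PySem.Str.count s "(" : Int) - (PySem.Str.count s ")" : Int)
-- line.lstrip().startswith("@")
def pvIsAt (s : String) : Bool := PySem.Str.startswith (PySem.Str.lstrip s) "@"
-- " ".join(part.strip() for part in cur)
def pvJoin (cur : List String) : String := PySem.Str.join " " (cur.map PySem.Str.strip)
-- lines[i] (Python indexing, negative allowed; under Pre_ every access is in range)
def pvLine (lines : List String) (i : Int) : String := (PySem.List.pyGet? lines i).getD ""

-- ===== PORT A =====
-- inner while: 'while i < len(lines) and paren_depth > 0'
def pvAInner (lines : List String) : Nat → Int → Int → List String → List String × Int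
  | 0, i, _, cur => (cur, i)
  | fuel + 1, i, depth, cur =>
    if i < (lines.length : Int) ∧ 0 < depth then
      pvAInner lines fuel (i + 1) (depth + pvNet (pvLine lines i)) (cur ++ [pvRstripNL (pvLine lines i)])
    else (cur, i)

-- outer while: 'while i < len(lines)'
def pvAOuter (lines : List String) : Nat → Int → List String → List String × Int
  | 0, i, acc => (acc, i)
  | fuel + 1, i, acc =>
    if i < (lines.length : Int) then
      if pvIsAt (pvLine lines i) then
        pvAOuter lines fuel (pvAInner lines fuel (i + 1) (pvNet (pvLine lines i)) [pvRstripNL (pvLine lines i)]).2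
          (acc ++ [pvJoin (pvAInner lines fuel (i + 1) (pvNet (pvLine lines i)) [pvRstripNL (pvLine lines i)]).1])
      else (acc, i)
    else (acc, i)

def collect_annotation_block (lines : List String) (start_index : Int) : List String × Int :=
  pvAOuter lines (((lines.length : Int) - start_index).toNat + 1) start_index []

-- ===== PORT B =====
-- block_end(s): 'for e in range(s, n): total += net(e); if total <= 0: return e + 1' / 'return n'
def pvBEnd (lines : List String) : Nat → Int → Int → Int
  | 0, _, _ => (lines.length : Int)
  | fuel + 1, e, total =>
    if e < (lines.length : Int) then
      if total + pvNet (pvLine lines e) ≤ 0 then e + 1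
      else pvBEnd lines fuel (e + 1) (total + pvNet (pvLine lines e))
    else (lines.length : Int)

-- render(s, e): '" ".join(lines[k].strip() for k in range(s, e))'
def pvRender (lines : List String) (s e : Int) : String :=
  PySem.Str.join " " ((PySem.List.pyRange s e 1).map (fun k => PySem.Str.strip (pvLine lines k)))

-- go(i): recursion on the block structure
def pvBGo (lines : List String) : Nat → Int → List String × Int
  | 0, i => ([], i)
  | fuel + 1, i =>
    if i < (lines.length : Int) ∧ pvIsAt (pvLine lines i) then
      (pvRender lines i (pvBEnd lines ((lines.length : Int) - i).toNat i 0)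
          :: (pvBGo lines fuel (pvBEnd lines ((lines.length : Int) - i).toNat i 0)).1,
        (pvBGo lines fuel (pvBEnd lines ((lines.length : Int) - i).toNat i 0)).2)
    else ([], i)

def collect_annotation_block_alt (lines : List String) (start_index : Int) : List String × Int :=
  pvBGo lines (((lines.length : Int) - start_index).toNat + 1) start_index

-- ===== PRECONDITION & SPEC =====
-- Pre_ excludes exactly the inputs where the Python raises IndexError: start_index below
-- -len(lines), where the very first lines[i] access is out of range (A and B both raise there).
def Pre_collect_annotation_block (lines : List String) (start_index : Int) : Prop :=
  -(lines.length : Int) ≤ start_index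
instance (lines : List String) (start_index : Int) : Decidable (Pre_collect_annotation_block lines start_index) := by unfold Pre_collect_annotation_block; infer_instance

def pvWitness_collect_annotation_block : List String × Int := (["@foo(", "  bar)", "@baz", "code"], 0)

def Spec_collect_annotation_block (lines : List String) (start_index : Int) (out : List String × Int) : Prop := out = collect_annotation_block_alt lines start_index
instance (lines : List String) (start_index : Int) (out : List String × Int) : Decidable (Spec_collect_annotation_block lines start_index out) := by unfold Spec_collect_annotation_block; infer_instance

-- ===== CLAIM (what is proved, stated in full; the proofs are below) =====
def Claim_equal_collect_annotation_block : Prop := ∀ (lines : List String) (start_index : Int), Dom_collect_annotation_block lines start_index → Pre_collect_annotation_block lines start_index → Spec_collect_annotation_block lines start_index (collect_annotation_block lines start_index)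

-- ===== LEMMAS AND PROOFS =====

-- '\n' is Python whitespace, so dropping it under a whitespace dropWhile changes nothing.
theorem pv_dropWhile_dropWhile_append {p q : Char → Bool} (h : ∀ x, q x = true → p x = true) :
    ∀ (X Y : List Char), List.dropWhile p (List.dropWhile q X ++ Y) = List.dropWhile p (X ++ Y) := by
  intro X
  induction X with
  | nil => intro Y; rfl
  | cons a X' ih =>
    intro Y
    by_cases hq : q a = true
    · have h1 : List.dropWhile q (a :: X') = List.dropWhile q X' := by simp [hq]
      have h2 : List.dropWhile p ((a :: X') ++ Y) = List.dropWhile p (X' ++ Y) := by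
        simp [h a hq]
      rw [h1, ih, h2]
    · have h1 : List.dropWhile q (a :: X') = a :: X' := by simp [hq]
      rw [h1]

-- stripping a char list whose trailing newlines were removed strips to the same list
theorem pv_strip_chars (l : List Char) :
    PySem.Chars.strip ((l.reverse.dropWhile (· == '\n')).reverse) = PySem.Chars.strip l := by
  have hnl : ∀ x : Char, (x == '\n') = true → PySem.Chars.isspace x = true := by
    intro x hx
    have : x = '\n' := by simpa using hx
    subst this; decide
  by_cases hall : List.dropWhile PySem.Chars.isspace l = []
  · -- l is all whitespace; so is its prefix with trailing newlines removed
    have hmem : ∀ x ∈ l, PySem.Chars.isspace x = true := by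
      intro x hx
      exact List.dropWhile_eq_nil_iff.mp hall x hx
    have hmem' : ∀ x ∈ (l.reverse.dropWhile (· == '\n')).reverse, PySem.Chars.isspace x = true := by
      intro x hx
      apply hmem
      have := (List.dropWhile_sublist (l := l.reverse) (p := (· == '\n'))).subset
        (List.mem_reverse.mp hx)
      exact List.mem_reverse.mp this
    simp only [PySem.Chars.strip, PySem.Chars.lstrip, hall,
      List.dropWhile_eq_nil_iff.mpr hmem']
  · -- l = w ++ c :: t with w all whitespace and c not whitespace
    obtain ⟨c, t, hct⟩ : ∃ c t, List.dropWhile PySem.Chars.isspace l = c :: t := by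
      cases hd : List.dropWhile PySem.Chars.isspace l with
      | nil => exact absurd hd hall
      | cons c t => exact ⟨c, t, rfl⟩
    have hc : PySem.Chars.isspace c = false := by
      have := List.head_dropWhile_not (p := PySem.Chars.isspace) (l := l) (by simp [hct])
      simpa [hct] using this
    have hcnl : (c == '\n') = false := by
      by_contra h
      have : (c == '\n') = true := by
        cases hh : (c == '\n') <;> simp_all
      exact absurd (hnl c this) (by simp [hc])
    have hw : ∀ x ∈ List.takeWhile PySem.Chars.isspace l, PySem.Chars.isspace x = true :=
      fun x hx => List.mem_takeWhile_imp hx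
    have hsplit : l = List.takeWhile PySem.Chars.isspace l ++ c :: t := by
      conv_lhs => rw [← List.takeWhile_append_dropWhile (p := PySem.Chars.isspace) (l := l)]
      rw [hct]
    set w := List.takeWhile PySem.Chars.isspace l with hwdef
    -- trailing-newline removal keeps w and c and acts inside t
    have hrev : l.reverse.dropWhile (· == '\n')
        = (t.reverse.dropWhile (· == '\n')) ++ c :: w.reverse := by
      rw [hsplit]
      simp only [List.reverse_append, List.reverse_cons]
      rw [List.append_assoc]
      rw [List.dropWhile_append]
      by_cases hte : (t.reverse.dropWhile (· == '\n')).isEmpty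
      · simp only [hte, if_true]
        have : t.reverse.dropWhile (· == '\n') = [] := by
          simpa [List.isEmpty_iff] using hte
        rw [this]
        simp [List.dropWhile_cons, hcnl]
      · simp only [hte, if_false]
        simp
    have hlhs : ((l.reverse.dropWhile (· == '\n')).reverse)
        = w ++ c :: (t.reverse.dropWhile (· == '\n')).reverse := by
      rw [hrev]; simp
    rw [hlhs]
    -- both lstrips reduce to c :: (their tail)
    have hlsw : ∀ (z : List Char), List.dropWhile PySem.Chars.isspace (w ++ c :: z) = c :: z := by
      intro z
      rw [List.dropWhile_append]
      have hwe : (List.dropWhile PySem.Chars.isspace w).isEmpty := by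
        simp only [List.isEmpty_iff, List.dropWhile_eq_nil_iff]
        exact hw
      simp [hwe, List.dropWhile_cons, hc]
    have hlsl : List.dropWhile PySem.Chars.isspace l = c :: t := hct
    simp only [PySem.Chars.strip, PySem.Chars.lstrip, hlsw, hlsl, PySem.Chars.rstrip]
    congr 1
    simp only [List.reverse_cons, List.reverse_reverse]
    rw [pv_dropWhile_dropWhile_append hnl t.reverse [c]]

-- stripping a line whose trailing newlines were removed strips to the same string
theorem pv_strip_rstripNL (s : String) : PySem.Str.strip (pvRstripNL s) = PySem.Str.strip s := by
  unfold pvRstripNL PySem.Str.strip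
  rw [String.toList_ofList, pv_strip_chars s.toList]

-- joining A's rstrip("\n")-buffers with per-part strip() equals B's render over the index range
theorem pv_join_range (lines : List String) (s e : Int) :
    pvJoin ((PySem.List.pyRange s e 1).map (fun k => pvRstripNL (pvLine lines k)))
      = pvRender lines s e := by
  unfold pvJoin pvRender
  congr 1
  rw [List.map_map]
  exact List.map_congr_left (fun k _ => pv_strip_rstripNL (pvLine lines k))

-- block_end never moves before its start position
theorem pvBEnd_ge (lines : List String) : ∀ (g : Nat) (e t : Int), e ≤ (lines.length : Int) →
    e ≤ pvBEnd lines g e t := by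
  intro g
  induction g with
  | zero => intro e t he; simpa [pvBEnd] using he
  | succ g ih =>
    intro e t he
    simp only [pvBEnd]
    split
    · split
      · omega
      · next h _ => exact le_trans (by omega) (ih (e + 1) _ (by omega))
    · exact he

-- with sufficient fuel block_end does not depend on the fuel
theorem pvBEnd_indep (lines : List String) : ∀ (g g' : Nat) (e t : Int),
    ((lines.length : Int) - e).toNat ≤ g → ((lines.length : Int) - e).toNat ≤ g' →
    pvBEnd lines g e t = pvBEnd lines g' e t := by
  intro g
  induction g with
  | zero =>
    intro g' e t hg hg'
    have he : ¬ e < (lines.length : Int) := by omega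
    cases g' with
    | zero => rfl
    | succ g' => simp [pvBEnd, he]
  | succ g ih =>
    intro g' e t hg hg'
    cases g' with
    | zero =>
      have he : ¬ e < (lines.length : Int) := by omega
      simp [pvBEnd, he]
    | succ g' =>
      simp only [pvBEnd]
      split
      · split
        · rfl
        · exact ih g' (e + 1) _ (by omega) (by omega)
      · rfl

-- A's inner loop, entered with positive depth, runs exactly to B's block_end and
-- accumulates exactly the rstrip("\n")-ed lines of the index range it crossed
theorem pvAInner_to_end (lines : List String) : ∀ (g : Nat) (e t : Int) (cur : List String),
    ((lines.length : Int) - e).toNat ≤ g → e ≤ (lines.length : Int) → 0 < t →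
    pvAInner lines g e t cur =
      (cur ++ (PySem.List.pyRange e (pvBEnd lines g e t) 1).map (fun k => pvRstripNL (pvLine lines k)),
        pvBEnd lines g e t) := by
  intro g
  induction g with
  | zero =>
    intro e t cur hg he ht
    have : e = (lines.length : Int) := by omega
    subst this
    simp [pvAInner, pvBEnd, PySem.List.pyRange_one_eq_nil le_rfl]
  | succ g ih =>
    intro e t cur hg he ht
    by_cases hlt : e < (lines.length : Int)
    · have hstep : pvAInner lines (g + 1) e t cur
          = pvAInner lines g (e + 1) (t + pvNet (pvLine lines e)) (cur ++ [pvRstripNL (pvLine lines e)]) := by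
        simp [pvAInner, hlt, ht]
      by_cases hle : t + pvNet (pvLine lines e) ≤ 0
      · have hend : pvBEnd lines (g + 1) e t = e + 1 := by
          simp [pvBEnd, hlt, hle]
        have hstop : pvAInner lines g (e + 1) (t + pvNet (pvLine lines e)) (cur ++ [pvRstripNL (pvLine lines e)])
            = (cur ++ [pvRstripNL (pvLine lines e)], e + 1) := by
          cases g <;> simp [pvAInner] <;> omega
        rw [hstep, hstop, hend]
        rw [PySem.List.pyRange_one_singleton]
        simp
      · have hend : pvBEnd lines (g + 1) e t = pvBEnd lines g (e + 1) (t + pvNet (pvLine lines e)) := by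
          simp [pvBEnd, hlt, hle]
        rw [hstep, hend]
        rw [ih (e + 1) _ _ (by omega) (by omega) (by omega)]
        have hge := pvBEnd_ge lines g (e + 1) (t + pvNet (pvLine lines e)) (by omega)
        rw [PySem.List.pyRange_one_cons (by omega :
          e < pvBEnd lines g (e + 1) (t + pvNet (pvLine lines e)))]
        simp
    · have : e = (lines.length : Int) := by omega
      subst this
      have h1 : pvAInner lines (g + 1) (lines.length : Int) t cur = (cur, (lines.length : Int)) := by
        simp [pvAInner]
      have h2 : pvBEnd lines (g + 1) (lines.length : Int) t = (lines.length : Int) := by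
        simp [pvBEnd]
      rw [h1, h2, PySem.List.pyRange_one_eq_nil le_rfl]
      simp

-- the main simulation: A's outer loop from position i equals acc ++ B's block recursion from i
theorem pv_sim (lines : List String) : ∀ (fuel : Nat) (i : Int),
    ((lines.length : Int) - i).toNat < fuel → ∀ (acc : List String),
    pvAOuter lines fuel i acc = (acc ++ (pvBGo lines fuel i).1, (pvBGo lines fuel i).2) := by
  intro fuel
  induction fuel with
  | zero => intro i h; exact absurd h (Nat.not_lt_zero _)
  | succ fuel ih =>
    intro i hf acc
    by_cases hi : i < (lines.length : Int)
    · by_cases hat : pvIsAt (pvLine lines i) = true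
      · have hfuel1 : 1 ≤ fuel ∨ ((lines.length : Int) - (i + 1)).toNat = 0 := by omega
        have hfpos : 0 < fuel := by omega
        have hBgo : pvBGo lines (fuel + 1) i
            = (pvRender lines i (pvBEnd lines ((lines.length : Int) - i).toNat i 0)
                  :: (pvBGo lines fuel (pvBEnd lines ((lines.length : Int) - i).toNat i 0)).1,
                (pvBGo lines fuel (pvBEnd lines ((lines.length : Int) - i).toNat i 0)).2) := by
          simp [pvBGo, hi, hat]
        obtain ⟨g0, hg0⟩ : ∃ g0, ((lines.length : Int) - i).toNat = g0 + 1 :=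
          ⟨((lines.length : Int) - i).toNat - 1, by omega⟩
        by_cases hnet : pvNet (pvLine lines i) ≤ 0
        · -- the block closes on its first line
          have hend : pvBEnd lines ((lines.length : Int) - i).toNat i 0 = i + 1 := by
            rw [hg0]; simp [pvBEnd, hi, hnet]
          have hstop : pvAInner lines fuel (i + 1) (pvNet (pvLine lines i)) [pvRstripNL (pvLine lines i)]
              = ([pvRstripNL (pvLine lines i)], i + 1) := by
            cases fuel <;> simp [pvAInner] <;> omega
          have hjoin : pvJoin [pvRstripNL (pvLine lines i)] = pvRender lines i (i + 1) := by
            have := pv_join_range lines i (i + 1)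
            rwa [PySem.List.pyRange_one_singleton, List.map_cons, List.map_nil] at this
          simp only [pvAOuter, hi, if_pos, hat, hstop, hjoin, hBgo, hend]
          rw [ih (i + 1) (by omega) (acc ++ [pvRender lines i (i + 1)])]
          simp
        · -- a multi-line block: A's inner loop runs to block_end
          have hend : pvBEnd lines ((lines.length : Int) - i).toNat i 0
              = pvBEnd lines g0 (i + 1) (pvNet (pvLine lines i)) := by
            rw [hg0]; simp [pvBEnd, hi, hnet]
          have hinner := pvAInner_to_end lines fuel (i + 1) (pvNet (pvLine lines i))
            [pvRstripNL (pvLine lines i)] (by omega) (by omega) (by omega)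
          have hEeq : pvBEnd lines fuel (i + 1) (pvNet (pvLine lines i))
              = pvBEnd lines g0 (i + 1) (pvNet (pvLine lines i)) :=
            pvBEnd_indep lines fuel g0 (i + 1) _ (by omega) (by omega)
          set E := pvBEnd lines g0 (i + 1) (pvNet (pvLine lines i)) with hEdef
          have hgeE : i + 1 ≤ E := pvBEnd_ge lines g0 (i + 1) _ (by omega)
          have hcur : [pvRstripNL (pvLine lines i)]
                ++ (PySem.List.pyRange (i + 1) E 1).map (fun k => pvRstripNL (pvLine lines k))
              = (PySem.List.pyRange i E 1).map (fun k => pvRstripNL (pvLine lines k)) := by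
            rw [PySem.List.pyRange_one_cons (by omega : i < E)]
            simp
          rw [hEeq] at hinner
          simp only [pvAOuter, hi, if_pos, hat, hinner, hBgo, hend, ← hEdef]
          rw [hcur, pv_join_range lines i E]
          rw [ih E (by omega) (acc ++ [pvRender lines i E])]
          simp
      · simp [pvAOuter, pvBGo, hi, hat]
    · simp [pvAOuter, pvBGo, hi]

-- ===== VERDICT (by name: the statement is the Claim_ definition above) =====
theorem collect_annotation_block_spec : Claim_equal_collect_annotation_block := by
  intro lines start_index _ _
  unfold Spec_collect_annotation_block collect_annotation_block collect_annotation_block_alt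
  rw [pv_sim lines (((lines.length : Int) - start_index).toNat + 1) start_index (by omega) []]
  simp
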